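-- pv_equiv track=rewrite | github.com/paul17crib/envoy-cli | envoy/redactor.py | redact_keys
-- ===== SOURCE A (Python) =====
-- from typing import Dict, Optional
--
-- DEFAULT_PLACEHOLDER = "REDACTED"
--
-- def redact_keys(
--     env: Dict[str, str],
--     keys: list,
--     placeholder: str = DEFAULT_PLACEHOLDER,
-- ) -> Dict[str, str]:
--     """Return a new dict with *keys* explicitly replaced by *placeholder*.
--
--     Useful when the caller already knows which keys to redact, regardless of
--     whether they match the sensitive-key heuristics.
--     """
--     key_set = {k.upper() for k in keys}
--     return {
--         key: (placeholder if key.upper() in key_set else value)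
--         for key, value in env.items()
--     }
-- ===== SOURCE B (Python) =====
-- DEFAULT_PLACEHOLDER = "REDACTED"
--
--
-- def redact_keys(
--     env,
--     keys,
--     placeholder=DEFAULT_PLACEHOLDER,
-- ):
--     """Return a new dict with *keys* explicitly replaced by *placeholder*.
--
--     Copies env, groups env's keys by uppercase form once, then walks the
--     redaction keys and overwrites every env key in the matching group.
--     """
--     result = dict(env)
--     index = {}
--     for name in env:
--         index.setdefault(name.upper(), []).append(name)
--     for k in keys:
--         for name in index.get(k.upper(), []):
--             result[name] = placeholder
--     return result
-- ===== Notes on version B (the rewrite author's own statement) =====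
-- stated objective: alternative
-- what changed: Instead of one comprehension over env testing each key against a set of uppercased redaction keys, B copies env, builds a grouped index from uppercase form to the original env keys, then loops over the redaction keys overwriting each matched entry.
import Mathlib
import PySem

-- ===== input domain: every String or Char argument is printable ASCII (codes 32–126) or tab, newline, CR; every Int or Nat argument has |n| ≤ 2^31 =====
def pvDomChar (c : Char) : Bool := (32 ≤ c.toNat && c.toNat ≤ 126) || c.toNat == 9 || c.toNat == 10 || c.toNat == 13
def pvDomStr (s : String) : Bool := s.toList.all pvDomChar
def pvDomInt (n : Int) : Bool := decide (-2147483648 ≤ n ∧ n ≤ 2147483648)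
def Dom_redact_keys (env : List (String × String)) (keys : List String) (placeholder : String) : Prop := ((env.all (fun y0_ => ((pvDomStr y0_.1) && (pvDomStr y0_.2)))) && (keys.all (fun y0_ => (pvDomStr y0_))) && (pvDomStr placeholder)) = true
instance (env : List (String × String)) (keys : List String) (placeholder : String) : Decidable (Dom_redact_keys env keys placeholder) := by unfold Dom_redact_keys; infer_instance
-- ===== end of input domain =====

-- B redacts by walking the redaction keys over a grouped uppercase index of env's keys
-- instead of testing each env key against a set of uppercased keys (alternative decomposition, same cost).


-- ===== PORT A =====
def redact_keys (env : List (String × String)) (keys : List String) (placeholder : String) : List (String × String) :=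
  -- key_set = {k.upper() for k in keys}
  let key_set : PySem.Set String := PySem.Set.ofList (keys.map (fun k => PySem.Str.upper k))
  -- the dict comprehension over env.items(): a fold of dict inserts
  (env.foldl (fun d kv =>
      d.insert kv.1 (if PySem.Set.contains key_set (PySem.Str.upper kv.1) then placeholder else kv.2))
    PySem.Dict.empty).items

-- ===== PORT B =====
def redact_keys_alt (env : List (String × String)) (keys : List String) (placeholder : String) : List (String × String) :=
  -- result = dict(env)
  let result : PySem.Dict String String := env.foldl (fun d kv => d.insert kv.1 kv.2) PySem.Dict.empty
  -- for name in env: index.setdefault(name.upper(), []).append(name)  — i.e. index[u] = index.get(u, []) + [name]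
  let index : PySem.Dict String (List String) :=
    env.foldl (fun ix kv => ix.modify (PySem.Str.upper kv.1) [] (fun l => l ++ [kv.1])) PySem.Dict.empty
  -- for k in keys: for name in index.get(k.upper(), []): result[name] = placeholder
  (keys.foldl (fun d k =>
      (index.getD (PySem.Str.upper k) []).foldl (fun d name => d.insert name placeholder) d)
    result).items

-- ===== PRECONDITION & SPEC =====
-- env is a Python dict, so its association-list encoding has pairwise-distinct keys;
-- Pre_ states exactly that and excludes no input the Python A accepts (a dict cannot hold duplicate keys).
def Pre_redact_keys (env : List (String × String)) (keys : List String) (placeholder : String) : Prop :=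
  (env.map Prod.fst).Nodup
instance (env : List (String × String)) (keys : List String) (placeholder : String) : Decidable (Pre_redact_keys env keys placeholder) := by unfold Pre_redact_keys; infer_instance

def pvWitness_redact_keys : (List (String × String)) × List String × String :=
  ([("Path", "/bin"), ("token", "t0")], ["TOKEN"], "REDACTED")

def Spec_redact_keys (env : List (String × String)) (keys : List String) (placeholder : String) (out : List (String × String)) : Prop := out = redact_keys_alt env keys placeholder
instance (env : List (String × String)) (keys : List String) (placeholder : String) (out : List (String × String)) : Decidable (Spec_redact_keys env keys placeholder out) := by unfold Spec_redact_keys; infer_instance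

-- ===== CLAIM (what is proved, stated in full; the proofs are below) =====
def Claim_equal_redact_keys : Prop := ∀ (env : List (String × String)) (keys : List String) (placeholder : String), Dom_redact_keys env keys placeholder → Pre_redact_keys env keys placeholder → Spec_redact_keys env keys placeholder (redact_keys env keys placeholder)

-- ===== LEMMAS AND PROOFS =====

-- the per-entry redaction both sides compute: redact kv iff kv.1.upper() is among the uppercased ks
def rkF (ph : String) (ks : List String) (kv : String × String) : String × String :=
  (kv.1, if (ks.map PySem.Str.upper).contains (PySem.Str.upper kv.1) then ph else kv.2)

-- A: the fold of inserts over env's distinct, fresh keys is a single map over env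
theorem redact_keys_eq_map (env : List (String × String)) (keys : List String) (ph : String)
    (hnd : (env.map Prod.fst).Nodup) :
    redact_keys env keys ph = env.map (rkF ph keys) := by
  unfold redact_keys
  rw [PySem.Dict.items_foldl_insert_fresh env Prod.fst
      (fun kv => if PySem.Set.contains (PySem.Set.ofList (keys.map (fun k => PySem.Str.upper k))) (PySem.Str.upper kv.1) then ph else kv.2)
      PySem.Dict.empty (fun a _ => PySem.Dict.contains_empty _) hnd]
  rw [show PySem.Dict.empty.items = ([] : List (String × String)) from rfl, List.nil_append]
  apply List.map_congr_left
  intro a _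
  simp [rkF, pysem, eq_comm]

-- B's index: the group stored under k.upper() is exactly env's keys whose uppercase form is k.upper()
theorem index_getD (env : List (String × String)) (k : String) :
    (env.foldl (fun ix kv => ix.modify (PySem.Str.upper kv.1) [] (fun l => l ++ [kv.1])) PySem.Dict.empty).getD (PySem.Str.upper k) []
    = (env.filter (fun kv => PySem.Str.upper kv.1 == PySem.Str.upper k)).map Prod.fst := by
  have h := (@List.foldl_map (String × String) (String × String) (PySem.Dict String (List String))
      (fun kv => (PySem.Str.upper kv.1, kv.1))
      (fun d p => d.modify p.1 [] (fun l => l ++ [p.2])) env PySem.Dict.empty).symm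
  simp only at h
  rw [h, PySem.Dict.getD_foldl_modify_append]
  simp [List.filter_map, Function.comp_def]

-- inserting ph at each name of ns (all of them existing keys) replaces exactly those entries
theorem insert_fold_mk (ph : String) : ∀ (ns : List String) (l : List (String × String)),
    (∀ n ∈ ns, n ∈ l.map Prod.fst) →
    ns.foldl (fun d n => d.insert n ph) (PySem.Dict.mk l)
      = PySem.Dict.mk (l.map (fun kv => if ns.contains kv.1 then (kv.1, ph) else kv)) := by
  intro ns
  induction ns with
  | nil => intro l _; simp
  | cons n ns ih =>
    intro l hsub
    have hc : (PySem.Dict.mk l).contains n = true := by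
      rcases List.mem_map.mp (hsub n (List.mem_cons_self ..)) with ⟨p, hp, he⟩
      rw [PySem.Dict.contains_mk]
      exact List.any_eq_true.mpr ⟨p, hp, by simp [he]⟩
    have hins : (PySem.Dict.mk l).insert n ph
        = PySem.Dict.mk (l.map (fun p => if p.1 == n then (n, ph) else p)) := by
      apply PySem.Dict.ext
      rw [PySem.Dict.items_insert_of_contains _ _ hc]
    have hfst : ∀ p : String × String, ((fun p => if p.1 == n then (n, ph) else p) p).1 = p.1 := by
      intro p; by_cases h : p.1 = n <;> simp [h]
    rw [List.foldl_cons, hins, ih _ (by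
      intro m hm
      rcases List.mem_map.mp (hsub m (List.mem_cons_of_mem _ hm)) with ⟨p, hp, he⟩
      exact List.mem_map.mpr ⟨_, List.mem_map_of_mem hp, by rw [hfst p, he]⟩)]
    congr 1
    rw [List.map_map]
    apply List.map_congr_left
    intro p _
    by_cases h1 : p.1 = n <;> by_cases h2 : ns.contains p.1 <;> simp [h1]

-- B's outer loop: each redaction key k overwrites exactly the env entries whose uppercase key is k.upper()
theorem outer_fold (env : List (String × String)) (ph : String) : ∀ (ks done : List String),
    ks.foldl (fun d k =>
        ((env.filter (fun kv => PySem.Str.upper kv.1 == PySem.Str.upper k)).map Prod.fst).foldl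
          (fun d name => d.insert name ph) d)
      (PySem.Dict.mk (env.map (rkF ph done)))
    = PySem.Dict.mk (env.map (rkF ph (done ++ ks))) := by
  intro ks
  induction ks with
  | nil => intro done; simp
  | cons k ks ih =>
    intro done
    rw [List.foldl_cons]
    rw [insert_fold_mk ph _ _ (by
      intro n hn
      rcases List.mem_map.mp hn with ⟨kv, hkv, he⟩
      have hkv' : kv ∈ env := List.mem_of_mem_filter hkv
      exact List.mem_map.mpr ⟨rkF ph done kv, List.mem_map_of_mem hkv', by simp [rkF, he]⟩)]
    have hstep : (env.map (rkF ph done)).map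
        (fun kv => if ((env.filter (fun kv => PySem.Str.upper kv.1 == PySem.Str.upper k)).map Prod.fst).contains kv.1 then (kv.1, ph) else kv)
        = env.map (rkF ph (done ++ [k])) := by
      rw [List.map_map]
      apply List.map_congr_left
      intro a ha
      by_cases h : PySem.Str.upper a.1 = PySem.Str.upper k
      · have hmem : a.1 ∈ (env.filter (fun kv => PySem.Str.upper kv.1 == PySem.Str.upper k)).map Prod.fst :=
          List.mem_map_of_mem (List.mem_filter.mpr ⟨ha, by simp [h]⟩)
        simp [rkF, hmem, h]
      · have hmem : a.1 ∉ (env.filter (fun kv => PySem.Str.upper kv.1 == PySem.Str.upper k)).map Prod.fst := by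
          intro hc
          rcases List.mem_map.mp hc with ⟨kv, hkv, he⟩
          exact h (by rw [← he]; simpa using (List.mem_filter.mp hkv).2)
        simp [rkF, hmem, h]
    rw [hstep, ih (done ++ [k]), List.append_assoc]
    rfl

-- B equals the same map over env
theorem redact_keys_alt_eq_map (env : List (String × String)) (keys : List String) (ph : String)
    (hnd : (env.map Prod.fst).Nodup) :
    redact_keys_alt env keys ph = env.map (rkF ph keys) := by
  unfold redact_keys_alt
  simp only [index_getD]
  have hres : env.foldl (fun d kv => d.insert kv.1 kv.2) PySem.Dict.empty
      = PySem.Dict.mk (env.map (rkF ph [])) := by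
    apply PySem.Dict.ext
    rw [PySem.Dict.items_foldl_insert_fresh env Prod.fst Prod.snd
        PySem.Dict.empty (fun a _ => PySem.Dict.contains_empty _) hnd]
    rw [show PySem.Dict.empty.items = ([] : List (String × String)) from rfl, List.nil_append]
    exact List.map_congr_left (fun a _ => by simp [rkF])
  rw [hres, outer_fold env ph keys []]
  rfl

-- ===== VERDICT (by name: the statement is the Claim_ definition above) =====
theorem redact_keys_spec : Claim_equal_redact_keys := by
  intro env keys placeholder _ hpre
  unfold Spec_redact_keys
  rw [redact_keys_eq_map env keys placeholder hpre, redact_keys_alt_eq_map env keys placeholder hpre]
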